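-- pv_equiv track=rewrite | github.com/rafqel/UFRJ | Comp-1-UFRJ/lista6rafaeljesus.py | questao4
-- ===== SOURCE A (Python) =====
-- def questao4(produtos,precos):
--     dicionario = {}
--     for i in range(len(produtos)):
--         nome = produtos[i]
--         valor = precos[i]
--         if nome in dicionario:
--             if valor>dicionario[nome]:
--                 dicionario[nome] = valor
--         else:
--             dicionario[nome] = valor
--
--     return dicionario
-- ===== SOURCE B (Python) =====
-- def questao4(produtos, precos):
--     grupos = {}
--     for i in range(len(produtos)):
--         grupos.setdefault(produtos[i], []).append(precos[i])
--     return {nome: max(vals) for nome, vals in grupos.items()}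
-- ===== Notes on version B (the rewrite author's own statement) =====
-- stated objective: alternative
-- what changed: B first groups all prices by product name into lists in one pass and only afterwards reduces each group with max(), instead of A's inline running-maximum update per iteration.
import Mathlib
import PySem

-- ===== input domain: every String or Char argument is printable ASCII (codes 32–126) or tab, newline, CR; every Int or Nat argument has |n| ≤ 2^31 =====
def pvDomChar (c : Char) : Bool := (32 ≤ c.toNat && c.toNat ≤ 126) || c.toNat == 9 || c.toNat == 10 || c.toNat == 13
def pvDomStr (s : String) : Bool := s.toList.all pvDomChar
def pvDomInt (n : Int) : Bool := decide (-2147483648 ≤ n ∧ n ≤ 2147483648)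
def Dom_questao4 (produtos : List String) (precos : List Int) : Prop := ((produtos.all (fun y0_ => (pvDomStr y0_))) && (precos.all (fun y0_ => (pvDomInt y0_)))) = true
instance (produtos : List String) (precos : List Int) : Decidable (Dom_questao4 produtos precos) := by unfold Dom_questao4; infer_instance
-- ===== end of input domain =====

-- B groups all prices by product name into lists in one pass and reduces each group
-- with max afterwards, instead of A's inline running-maximum update (objective: alternative).

-- ===== PORT A =====
def questao4 (produtos : List String) (precos : List Int) : List (String × Int) :=
  ((PySem.List.pyRange 0 (PySem.List.len produtos)).foldl
    (fun d i =>
      let nome := PySem.List.pyGetD produtos i ""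
      let valor := PySem.List.pyGetD precos i 0
      if d.contains nome then
        if valor > d.getD nome 0 then d.insert nome valor else d
      else d.insert nome valor)
    (PySem.Dict.empty : PySem.Dict String Int)).items

-- ===== PORT B =====
def questao4_alt (produtos : List String) (precos : List Int) : List (String × Int) :=
  let grupos :=
    (PySem.List.pyRange 0 (PySem.List.len produtos)).foldl
      (fun g i =>
        g.modify (PySem.List.pyGetD produtos i "") [] (· ++ [PySem.List.pyGetD precos i 0]))
      (PySem.Dict.empty : PySem.Dict String (List Int))
  grupos.items.map (fun p => (p.1, (PySem.List.max? p.2 (fun x => x)).getD 0))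

-- ===== PRECONDITION & SPEC =====
-- Pre_ excludes exactly the inputs where A raises IndexError: precos shorter than produtos.
def Pre_questao4 (produtos : List String) (precos : List Int) : Prop :=
  produtos.length ≤ precos.length
instance (produtos : List String) (precos : List Int) : Decidable (Pre_questao4 produtos precos) := by unfold Pre_questao4; infer_instance

def pvWitness_questao4 : List String × List Int := (["a", "b", "a"], [1, 5, 3])

def Spec_questao4 (produtos : List String) (precos : List Int) (out : List (String × Int)) : Prop := out = questao4_alt produtos precos
instance (produtos : List String) (precos : List Int) (out : List (String × Int)) : Decidable (Spec_questao4 produtos precos out) := by unfold Spec_questao4; infer_instance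

-- ===== CLAIM (what is proved, stated in full; the proofs are below) =====
def Claim_equal_questao4 : Prop := ∀ (produtos : List String) (precos : List Int), Dom_questao4 produtos precos → Pre_questao4 produtos precos → Spec_questao4 produtos precos (questao4 produtos precos)

-- ===== LEMMAS AND PROOFS =====

-- max(vs) for a nonempty vs, with 0 for the (unreached) empty case
def pvMval (vs : List Int) : Int := (PySem.List.max? vs (fun x => x)).getD 0

-- the reduction B applies to each group
def pvF (q : String × List Int) : String × Int := (q.1, pvMval q.2)

def pvStepA (d : PySem.Dict String Int) (p : String × Int) : PySem.Dict String Int :=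
  if d.contains p.1 then
    if p.2 > d.getD p.1 0 then d.insert p.1 p.2 else d
  else d.insert p.1 p.2

def pvStepB (g : PySem.Dict String (List Int)) (p : String × Int) : PySem.Dict String (List Int) :=
  g.modify p.1 [] (· ++ [p.2])

lemma pvMval_append (vs : List Int) (hvs : vs ≠ []) (v : Int) :
    pvMval (vs ++ [v]) = if pvMval vs < v then v else pvMval vs := by
  cases vs with
  | nil => exact absurd rfl hvs
  | cons a t =>
    have h1 : pvMval (a :: t) = t.foldl max a := by
      simp [pvMval, PySem.List.max?_id_cons]
    have h2 : pvMval ((a :: t) ++ [v]) = (t ++ [v]).foldl max a := by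
      simp only [List.cons_append]
      simp [pvMval, PySem.List.max?_id_cons]
    rw [h1, h2, List.foldl_append]
    simp only [List.foldl]
    rcases lt_or_ge (t.foldl max a) v with hlt | hge
    · simp [max_eq_right hlt.le, hlt]
    · simp [max_eq_left hge, not_lt.mpr hge]

-- lookups through the pvF-mapped items list
lemma pv_contains_eq (d : PySem.Dict String Int) (g : PySem.Dict String (List Int))
    (h : d.items = g.items.map pvF) (k : String) : d.contains k = g.contains k := by
  simp [PySem.Dict.contains, h, List.any_map, Function.comp_def, pvF]

lemma pv_get?_eq (d : PySem.Dict String Int) (g : PySem.Dict String (List Int))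
    (h : d.items = g.items.map pvF) (k : String) :
    d.get? k = (g.get? k).map pvMval := by
  simp [PySem.Dict.get?, h, List.find?_map, Function.comp_def, pvF, Option.map_map]

-- one step preserves the relation between A's dict and B's grouping dict
lemma pv_step (d : PySem.Dict String Int) (g : PySem.Dict String (List Int))
    (h : d.items = g.items.map pvF)
    (hne : ∀ q ∈ g.items, q.2 ≠ [])
    (hnd : (g.items.map (·.1)).Nodup)
    (p : String × Int) :
    (pvStepA d p).items = (pvStepB g p).items.map pvF ∧
    (∀ q ∈ (pvStepB g p).items, q.2 ≠ []) ∧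
    ((pvStepB g p).items.map (·.1)).Nodup := by
  have hcont := pv_contains_eq d g h p.1
  have hkeys : ∀ q : String × List Int, (pvF q).1 = q.1 := fun q => rfl
  by_cases hc : g.contains p.1 = true
  · -- existing key: B appends to the group, A updates the running max
    obtain ⟨vs, hvs⟩ : ∃ vs, g.get? p.1 = some vs := by
      have := PySem.Dict.contains_eq_isSome_get? g p.1
      rw [hc] at this
      exact Option.isSome_iff_exists.mp this.symm
    have hmem : (p.1, vs) ∈ g.items := PySem.Dict.mem_items_of_get?_eq_some g hvs
    have hvsne : vs ≠ [] := hne _ hmem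
    have hgd : g.getD p.1 [] = vs := PySem.Dict.getD_of_get?_eq_some g [] hvs
    have hdd : d.getD p.1 0 = pvMval vs := by
      apply PySem.Dict.getD_of_get?_eq_some
      rw [pv_get?_eq d g h, hvs]; rfl
    have hBitems : (pvStepB g p).items
        = g.items.map (fun q => if q.1 == p.1 then (p.1, vs ++ [p.2]) else q) := by
      simp only [pvStepB, PySem.Dict.modify, hgd]
      exact PySem.Dict.items_insert_of_contains g _ hc
    refine ⟨?_, ?_, ?_⟩
    · -- the items relation
      rw [hBitems, List.map_map]
      have hstep : pvStepA d p = if pvMval vs < p.2 then d.insert p.1 p.2 else d := by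
        unfold pvStepA
        rw [hcont, hc, hdd]
        simp [gt_iff_lt]
      rw [hstep]
      by_cases hlt : pvMval vs < p.2
      · rw [if_pos hlt, PySem.Dict.items_insert_of_contains d p.2 (hcont.trans hc), h,
            List.map_map]
        apply List.map_congr_left
        intro q _
        by_cases hq : q.1 = p.1
        · simp [pvF, hq, pvMval_append vs hvsne p.2, hlt]
        · simp [pvF, hq]
      · rw [if_neg hlt, h]
        apply List.map_congr_left
        intro q hq
        by_cases hqk : q.1 = p.1
        · have hqvs : q.2 = vs := by
            have : g.get? p.1 = some q.2 := by
              apply PySem.Dict.get?_of_mem_items g (k := p.1) (v := q.2)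
              · rwa [← hqk, Prod.mk.eta]
              · simpa [PySem.Dict.keys] using hnd
            rw [hvs] at this
            exact (Option.some.injEq _ _ ▸ this.symm)
          simp [pvF, hqk, hqvs, pvMval_append vs hvsne p.2, hlt]
        · simp [pvF, hqk]
    · -- groups stay nonempty
      rw [hBitems]
      intro q hq
      obtain ⟨q', hq', rfl⟩ := List.mem_map.mp hq
      by_cases hqk : q'.1 = p.1
      · simp [hqk]
      · rw [if_neg (by simpa using hqk)]
        exact hne _ hq'
    · -- keys stay nodup
      rw [hBitems, List.map_map]
      have : (g.items.map ((fun q : String × List Int => q.1) ∘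
          (fun q => if q.1 == p.1 then (p.1, vs ++ [p.2]) else q))) = g.items.map (·.1) := by
        apply List.map_congr_left
        intro q _
        by_cases hqk : q.1 = p.1 <;> simp [hqk]
      rw [this]
      exact hnd
  · -- new key: both sides append a fresh entry
    have hcf : g.contains p.1 = false := by simpa using hc
    have hdf : d.contains p.1 = false := hcont.trans hcf
    have hBitems : (pvStepB g p).items = g.items ++ [(p.1, [p.2])] := by
      simp only [pvStepB, PySem.Dict.modify, PySem.Dict.getD_of_not_contains g [] hcf]
      exact PySem.Dict.items_insert_of_not_contains g _ hcf
    refine ⟨?_, ?_, ?_⟩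
    · have hstep : pvStepA d p = d.insert p.1 p.2 := by
        unfold pvStepA
        rw [hcont, hcf]
        simp
      rw [hstep, PySem.Dict.items_insert_of_not_contains d p.2 hdf,
          hBitems, List.map_append, h]
      rfl
    · rw [hBitems]
      intro q hq
      rcases List.mem_append.mp hq with hq | hq
      · exact hne _ hq
      · simp at hq; subst hq; simp
    · rw [hBitems, List.map_append]
      have hpk : p.1 ∉ g.items.map (·.1) := by
        intro hmem
        obtain ⟨q, hq, hq1⟩ := List.mem_map.mp hmem
        have : g.contains p.1 = true := by
          simp only [PySem.Dict.contains, List.any_eq_true]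
          exact ⟨q, hq, by simp [hq1]⟩
        rw [this] at hcf; exact Bool.noConfusion hcf
      rw [List.nodup_append]
      refine ⟨hnd, by simp, ?_⟩
      intro a ha b hb
      have hb' : b = p.1 := by simpa using hb
      subst hb'
      exact fun hab => hpk (hab ▸ ha)

lemma pv_fold (l : List (String × Int)) :
    ∀ (d : PySem.Dict String Int) (g : PySem.Dict String (List Int)),
    d.items = g.items.map pvF → (∀ q ∈ g.items, q.2 ≠ []) → (g.items.map (·.1)).Nodup →
    (l.foldl pvStepA d).items = (l.foldl pvStepB g).items.map pvF := by
  induction l with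
  | nil => intro d g h _ _; simpa using h
  | cons p t ih =>
    intro d g h hne hnd
    obtain ⟨h1, h2, h3⟩ := pv_step d g h hne hnd p
    exact ih _ _ h1 h2 h3

-- the index loop over range(len(produtos)) is the fold over the zipped pairs
lemma pv_zip_fold {β : Type} (produtos : List String) (precos : List Int)
    (h : produtos.length ≤ precos.length) (step : β → String × Int → β) (init : β) :
    (PySem.List.pyRange 0 (PySem.List.len produtos)).foldl
      (fun acc i => step acc (PySem.List.pyGetD produtos i "", PySem.List.pyGetD precos i 0)) init
    = (produtos.zip precos).foldl step init := by
  have hlen : PySem.List.len produtos = PySem.List.len (produtos.zip precos) := by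
    simp [PySem.List.len_eq, List.length_zip]; omega
  have hcongr : (PySem.List.pyRange 0 (PySem.List.len produtos)).foldl
      (fun acc i => step acc (PySem.List.pyGetD produtos i "", PySem.List.pyGetD precos i 0)) init
    = (PySem.List.pyRange 0 (PySem.List.len (produtos.zip precos))).foldl
      (fun acc j => step acc (PySem.List.pyGetD (produtos.zip precos) j ("", 0))) init := by
    rw [← hlen]
    apply PySem.List.foldl_congr_mem
    intro acc x hx
    obtain ⟨hx0, hxn⟩ := PySem.List.mem_pyRange_one.mp hx
    rw [PySem.List.len_eq] at hxn
    have hxp : x.toNat < produtos.length := by omega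
    have hxz : x.toNat < (produtos.zip precos).length := by
      simp [List.length_zip]; omega
    rw [PySem.List.pyGetD_eq_getElem produtos "" hx0 (by omega),
        PySem.List.pyGetD_eq_getElem precos 0 hx0 (by omega),
        PySem.List.pyGetD_eq_getElem (produtos.zip precos) ("", 0) hx0
          (by simp [List.length_zip]; omega)]
    simp [List.getElem_zip]
  rw [hcongr, PySem.List.foldl_pyRange_pyGetD _ _ _ _ le_rfl]
  simp

-- ===== VERDICT (by name: the statement is the Claim_ definition above) =====
theorem questao4_spec : Claim_equal_questao4 := by
  intro produtos precos _ hpre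
  have hA : questao4 produtos precos
      = ((produtos.zip precos).foldl pvStepA PySem.Dict.empty).items := by
    show ((PySem.List.pyRange 0 (PySem.List.len produtos)).foldl
        (fun acc i => pvStepA acc (PySem.List.pyGetD produtos i "", PySem.List.pyGetD precos i 0))
        PySem.Dict.empty).items = _
    rw [pv_zip_fold produtos precos hpre pvStepA PySem.Dict.empty]
  have hB : questao4_alt produtos precos
      = ((produtos.zip precos).foldl pvStepB PySem.Dict.empty).items.map pvF := by
    show ((PySem.List.pyRange 0 (PySem.List.len produtos)).foldl
        (fun acc i => pvStepB acc (PySem.List.pyGetD produtos i "", PySem.List.pyGetD precos i 0))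
        PySem.Dict.empty).items.map pvF = _
    rw [pv_zip_fold produtos precos hpre pvStepB PySem.Dict.empty]
  show questao4 produtos precos = questao4_alt produtos precos
  rw [hA, hB]
  exact pv_fold _ _ _ rfl (fun q hq => absurd hq (List.not_mem_nil))
    List.nodup_nil
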